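-- pv_equiv track=rewrite | github.com/MSDLLCpapers/teal-agents | src/sk-agents/src/sk_agents/auth/oauth_pkce.py | validate_code_verifier
-- ===== SOURCE A (Python) =====
-- def validate_code_verifier(verifier: str) -> bool:
--     """
--     Validate code verifier meets OAuth 2.1 requirements.
--
--     Args:
--         verifier: Code verifier to validate
--
--     Returns:
--         bool: True if valid, False otherwise
--     """
--     # Check length (43-128 characters)
--     if not (43 <= len(verifier) <= 128):
--         return False
--
--     # Check allowed characters
--     allowed_chars = set(
--         'ABCDEFGHIJKLMNOPQRSTUVWXYZabcdefghijklmnopqrstuvwxyz0123456789-._~'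
--     )
--     if not all(c in allowed_chars for c in verifier):
--         return False
--
--     return True
-- ===== SOURCE B (Python) =====
-- import re
--
-- _VERIFIER_RE = re.compile(r'[A-Za-z0-9._~\-]{43,128}')
--
-- def validate_code_verifier(verifier: str) -> bool:
--     """
--     Validate code verifier meets OAuth 2.1 requirements.
--
--     A single compiled regex encodes both the 43-128 length bound and the
--     allowed-character whitelist; fullmatch requires the whole string to match.
--     """
--     return bool(_VERIFIER_RE.fullmatch(verifier))
-- ===== Notes on version B (the rewrite author's own statement) =====
-- stated objective: idiomatic
-- what changed: Replaced the explicit length check plus set-membership scan with one compiled regex fullmatch whose character class and {43,128} quantifier encode both rules at once.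
import Mathlib
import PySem

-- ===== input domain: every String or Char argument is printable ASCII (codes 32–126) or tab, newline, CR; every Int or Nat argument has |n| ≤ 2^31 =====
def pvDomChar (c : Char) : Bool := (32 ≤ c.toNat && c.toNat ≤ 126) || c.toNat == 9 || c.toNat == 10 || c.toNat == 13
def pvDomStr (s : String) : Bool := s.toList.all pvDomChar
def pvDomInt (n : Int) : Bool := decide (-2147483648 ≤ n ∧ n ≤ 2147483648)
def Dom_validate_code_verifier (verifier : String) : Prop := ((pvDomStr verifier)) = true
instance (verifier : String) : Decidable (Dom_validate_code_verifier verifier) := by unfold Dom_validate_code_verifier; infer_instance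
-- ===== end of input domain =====

-- B replaces A's length check + set-membership scan by a single regex-style
-- full-string match ([A-Za-z0-9._~-]{43,128}), ported as a character-class
-- predicate (range comparisons) with the length bound.

-- ===== PORT A =====
def validate_code_verifier (verifier : String) : Bool :=
  let cs := verifier.toList
  if ¬ (43 ≤ cs.length ∧ cs.length ≤ 128) then false
  else
    let allowed : PySem.Set Char :=
      PySem.Set.ofList
        "ABCDEFGHIJKLMNOPQRSTUVWXYZabcdefghijklmnopqrstuvwxyz0123456789-._~".toList
    if ¬ (cs.all (fun c => PySem.Set.contains allowed c)) then false
    else true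

-- ===== PORT B =====
-- the regex character class [A-Za-z0-9._~-], exact on every Char
def pvCharClass (c : Char) : Bool :=
  ('A' ≤ c && c ≤ 'Z') || ('a' ≤ c && c ≤ 'z') || ('0' ≤ c && c ≤ '9') ||
    c == '.' || c == '_' || c == '~' || c == '-'

-- re.fullmatch r'[A-Za-z0-9._~\-]{43,128}': every char in the class, length 43..128
def validate_code_verifier_alt (verifier : String) : Bool :=
  let cs := verifier.toList
  decide (43 ≤ cs.length) && decide (cs.length ≤ 128) && cs.all pvCharClass

-- ===== PRECONDITION & SPEC =====
def Spec_validate_code_verifier (verifier : String) (out : Bool) : Prop := out = validate_code_verifier_alt verifier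
instance (verifier : String) (out : Bool) : Decidable (Spec_validate_code_verifier verifier out) := by unfold Spec_validate_code_verifier; infer_instance

-- ===== CLAIM (what is proved, stated in full; the proofs are below) =====
def Claim_equal_validate_code_verifier : Prop := ∀ (verifier : String), Dom_validate_code_verifier verifier → Spec_validate_code_verifier verifier (validate_code_verifier verifier)

-- ===== LEMMAS AND PROOFS =====

set_option maxRecDepth 8192 in
theorem pv_allowed_nodup :
    PySem.Set.ofList
        "ABCDEFGHIJKLMNOPQRSTUVWXYZabcdefghijklmnopqrstuvwxyz0123456789-._~".toList
      = "ABCDEFGHIJKLMNOPQRSTUVWXYZabcdefghijklmnopqrstuvwxyz0123456789-._~".toList := by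
  decide

set_option maxRecDepth 8192 in
theorem pv_contains_ofNat (n : Nat) (hn : n < 127) :
    List.contains
      "ABCDEFGHIJKLMNOPQRSTUVWXYZabcdefghijklmnopqrstuvwxyz0123456789-._~".toList
      (Char.ofNat n) = pvCharClass (Char.ofNat n) := by
  revert n hn; decide

set_option maxRecDepth 8192 in
theorem pv_contains_dom (c : Char) (hc : pvDomChar c = true) :
    List.contains
      "ABCDEFGHIJKLMNOPQRSTUVWXYZabcdefghijklmnopqrstuvwxyz0123456789-._~".toList c
      = pvCharClass c := by
  have hlt : c.toNat < 127 := by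
    simp only [pvDomChar, Bool.or_eq_true, Bool.and_eq_true, decide_eq_true_eq,
      beq_iff_eq] at hc
    omega
  have h := pv_contains_ofNat c.toNat hlt
  rwa [Char.ofNat_toNat] at h

set_option maxRecDepth 8192 in
theorem pv_all_eq (cs : List Char) (hd : cs.all pvDomChar = true) :
    cs.all (fun c =>
      PySem.Set.contains
        (PySem.Set.ofList
          "ABCDEFGHIJKLMNOPQRSTUVWXYZabcdefghijklmnopqrstuvwxyz0123456789-._~".toList) c)
      = cs.all pvCharClass := by
  induction cs with
  | nil => rfl
  | cons c cs ih =>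
    simp only [List.all_cons, Bool.and_eq_true] at hd
    simp only [List.all_cons, ih hd.2]
    congr 1
    rw [PySem.Set.contains_eq_listContains, pv_allowed_nodup,
        pv_contains_dom c hd.1]

-- ===== VERDICT (by name: the statement is the Claim_ definition above) =====
set_option maxRecDepth 8192 in
theorem validate_code_verifier_spec : Claim_equal_validate_code_verifier := by
  intro v hd
  unfold Spec_validate_code_verifier validate_code_verifier validate_code_verifier_alt
  have hall := pv_all_eq v.toList hd
  by_cases h1 : 43 ≤ v.toList.length ∧ v.toList.length ≤ 128
  · simp only [h1]
    rw [hall]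
    by_cases h2 : v.toList.all pvCharClass = true
    · simp [h2]
    · simp only [Bool.not_eq_true] at h2
      simp [h2]
  · rw [if_pos h1]
    rw [not_and_or] at h1
    simp only [String.length_toList] at h1
    rcases h1 with h | h <;> simp [h]
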